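-- pv_equiv track=rewrite | github.com/nd-aditya/athenaone_airflow_automation | Deid_service/deidentification/deIdentification/qc_package/scanner.py | merge_dicts_list
-- ===== SOURCE A (Python) =====
-- from collections import defaultdict
--
-- def merge_dicts_list(dicts_list: list[dict]):
--     merged = defaultdict(list)
--
--     for d in dicts_list:
--         for key, values in d.items():
--             merged[key].extend(values)
--
--     for k, v in merged.items():
--         seen = set()
--         merged[k] = [x for x in v if not (x in seen or seen.add(x))]
--
--     return dict(merged)
-- ===== SOURCE B (Python) =====
-- def merge_dicts_list(dicts_list: list[dict]):
--     result = {}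
--     for d in dicts_list:
--         for key, values in d.items():
--             out = result.setdefault(key, [])
--             for x in values:
--                 if x not in out:
--                     out.append(x)
--     return result
-- ===== Notes on version B (the rewrite author's own statement) =====
-- stated objective: simpler
-- what changed: One fused pass: each value is appended to its key's output list only if not already present there, instead of A's two phases (extend everything into a defaultdict, then rescan every list with a seen-set to deduplicate).
import Mathlib
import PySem

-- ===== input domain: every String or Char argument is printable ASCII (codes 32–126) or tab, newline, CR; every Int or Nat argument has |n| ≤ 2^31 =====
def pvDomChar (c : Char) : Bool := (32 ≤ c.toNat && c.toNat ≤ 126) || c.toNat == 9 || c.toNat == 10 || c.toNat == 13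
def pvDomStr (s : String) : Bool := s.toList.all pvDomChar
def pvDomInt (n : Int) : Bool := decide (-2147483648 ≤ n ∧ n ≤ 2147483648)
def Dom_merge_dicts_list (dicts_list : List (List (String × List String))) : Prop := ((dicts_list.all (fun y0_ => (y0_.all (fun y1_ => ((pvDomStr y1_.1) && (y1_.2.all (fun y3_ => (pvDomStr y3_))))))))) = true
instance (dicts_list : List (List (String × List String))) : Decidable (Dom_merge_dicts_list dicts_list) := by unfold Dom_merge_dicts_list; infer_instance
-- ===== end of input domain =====

-- B fuses A's two phases (extend-all, then rescan with a seen-set) into one pass that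
-- appends a value only if its key's list does not already hold it; objective: simpler.
-- Python B mutates the list obtained by setdefault in place; modeled by Dict.insert at
-- the same key (overwrite keeps the key's position, a new key appends) — return value equal.

-- ===== PORT A =====
-- merged[key].extend(values)  (defaultdict: missing key starts as [])
def pvExtendStep (d : PySem.Dict String (List String)) (kv : String × List String) :
    PySem.Dict String (List String) :=
  d.insert kv.1 ((d.getD kv.1 []) ++ kv.2)

-- [x for x in v if not (x in seen or seen.add(x))]  with seen = set()
def pvDedupA (v : List String) : List String :=
  (v.foldl (fun (p : PySem.Set String × List String) x =>
      if PySem.Set.contains p.1 x then p else (PySem.Set.add p.1 x, p.2 ++ [x]))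
    (PySem.Set.empty, [])).2

def merge_dicts_list (dicts_list : List (List (String × List String))) :
    List (String × List String) :=
  let merged := dicts_list.foldl (fun d items => items.foldl pvExtendStep d) PySem.Dict.empty
  -- for k, v in merged.items(): merged[k] = <dedup of v>
  let merged2 := merged.items.foldl (fun d kv => d.insert kv.1 (pvDedupA kv.2)) merged
  merged2.items

-- ===== PORT B =====
-- if x not in out: out.append(x)
def pvAppendNew (out : List String) (x : String) : List String :=
  if out.contains x then out else out ++ [x]

-- out = result.setdefault(key, []); for x in values: if x not in out: out.append(x)
def pvMergeStep (res : PySem.Dict String (List String)) (kv : String × List String) :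
    PySem.Dict String (List String) :=
  res.insert kv.1 (kv.2.foldl pvAppendNew (res.getD kv.1 []))

def merge_dicts_list_alt (dicts_list : List (List (String × List String))) :
    List (String × List String) :=
  (dicts_list.foldl (fun res d => d.foldl pvMergeStep res) PySem.Dict.empty).items

-- ===== PRECONDITION & SPEC =====
def Spec_merge_dicts_list (dicts_list : List (List (String × List String))) (out : List (String × List String)) : Prop := out = merge_dicts_list_alt dicts_list
instance (dicts_list : List (List (String × List String))) (out : List (String × List String)) : Decidable (Spec_merge_dicts_list dicts_list out) := by unfold Spec_merge_dicts_list; infer_instance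

-- ===== CLAIM (what is proved, stated in full; the proofs are below) =====
def Claim_equal_merge_dicts_list : Prop := ∀ (dicts_list : List (List (String × List String))), Dom_merge_dicts_list dicts_list → Spec_merge_dicts_list dicts_list (merge_dicts_list dicts_list)

-- ===== LEMMAS AND PROOFS =====

-- entry-wise dedup, as B computes it from scratch
def pvF (kv : String × List String) : String × List String :=
  (kv.1, kv.2.foldl pvAppendNew [])

-- A's seen-set comprehension keeps the pair diagonal: its list component is B's fold
theorem pvDedupA_diag (v : List String) : ∀ (a : List String),
    (v.foldl (fun (p : PySem.Set String × List String) x =>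
      if PySem.Set.contains p.1 x then p else (PySem.Set.add p.1 x, p.2 ++ [x])) (a, a)).2
    = v.foldl pvAppendNew a := by
  induction v with
  | nil => intro a; rfl
  | cons x t ih =>
    intro a
    have hstep : (if PySem.Set.contains a x = true then ((a, a) : PySem.Set String × List String)
        else (PySem.Set.add a x, a ++ [x])) = (pvAppendNew a x, pvAppendNew a x) := by
      by_cases h : x ∈ a
      · simp [PySem.Set.contains, pvAppendNew, h]
      · simp [PySem.Set.contains, PySem.Set.add, pvAppendNew, h]
    simp only [List.foldl_cons, hstep]
    exact ih (pvAppendNew a x)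

theorem pvDedupA_eq (v : List String) : pvDedupA v = v.foldl pvAppendNew [] := by
  simpa [pvDedupA, PySem.Set.empty] using pvDedupA_diag v []

theorem find?_map_pvF (l : List (String × List String)) (k : String) :
    (l.map pvF).find? (fun p => p.1 == k) = (l.find? (fun p => p.1 == k)).map pvF := by
  induction l with
  | nil => rfl
  | cons p t ih =>
    by_cases h : (p.1 == k) = true
    · simp [List.find?, pvF, h]
    · simp only [Bool.not_eq_true] at h
      simp [List.find?, pvF, h, ih]

def pvInv (dA dB : PySem.Dict String (List String)) : Prop :=
  dB.items = dA.items.map pvF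

theorem pvInv_getD {dA dB : PySem.Dict String (List String)} (h : pvInv dA dB) (k : String) :
    dB.getD k [] = (dA.getD k []).foldl pvAppendNew [] := by
  unfold pvInv at h
  simp only [PySem.Dict.getD, PySem.Dict.get?, h, find?_map_pvF]
  cases dA.items.find? (fun p => p.1 == k) with
  | none => rfl
  | some p => simp [pvF]

theorem pvInv_contains {dA dB : PySem.Dict String (List String)} (h : pvInv dA dB) (k : String) :
    dB.contains k = dA.contains k := by
  unfold pvInv at h
  have hcomp : ((fun p : String × List String => p.1 == k) ∘ pvF)
      = fun p : String × List String => p.1 == k := by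
    funext p; simp [pvF, Function.comp]
  simp [PySem.Dict.contains, h, List.any_map, hcomp]

theorem pvInv_insert {dA dB : PySem.Dict String (List String)} (h : pvInv dA dB)
    (k : String) (w : List String) :
    pvInv (dA.insert k w) (dB.insert k (w.foldl pvAppendNew [])) := by
  unfold pvInv
  unfold PySem.Dict.insert
  rw [pvInv_contains h]
  by_cases hc : dA.contains k = true
  · simp only [hc, if_true]
    unfold pvInv at h
    rw [h, List.map_map, List.map_map]
    refine List.map_congr_left ?_
    intro p _
    by_cases hk : (p.1 == k) = true
    · simp [Function.comp, pvF, hk]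
    · simp only [Bool.not_eq_true] at hk
      simp [Function.comp, pvF, hk]
  · simp only [hc]
    unfold pvInv at h
    simp [h, pvF]

theorem pvInv_step {dA dB : PySem.Dict String (List String)} (h : pvInv dA dB)
    (kv : String × List String) :
    pvInv (pvExtendStep dA kv) (pvMergeStep dB kv) := by
  unfold pvExtendStep pvMergeStep
  rw [pvInv_getD h, ← List.foldl_append]
  exact pvInv_insert h kv.1 _

theorem pvInv_inner (items : List (String × List String)) :
    ∀ {dA dB : PySem.Dict String (List String)}, pvInv dA dB →
    pvInv (items.foldl pvExtendStep dA) (items.foldl pvMergeStep dB) := by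
  induction items with
  | nil => intro _ _ h; exact h
  | cons kv t ih => intro dA dB h; exact ih (pvInv_step h kv)

theorem pvInv_outer (L : List (List (String × List String))) :
    ∀ {dA dB : PySem.Dict String (List String)}, pvInv dA dB →
    pvInv (L.foldl (fun d items => items.foldl pvExtendStep d) dA)
          (L.foldl (fun res d => d.foldl pvMergeStep res) dB) := by
  induction L with
  | nil => intro _ _ h; exact h
  | cons items t ih => intro dA dB h; exact ih (pvInv_inner items h)

-- keys stay nodup through phase 1
theorem keys_insert_nodup {d : PySem.Dict String (List String)} (h : d.keys.Nodup)
    (k : String) (w : List String) : (d.insert k w).keys.Nodup := by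
  unfold PySem.Dict.insert
  by_cases hc : d.contains k = true
  · simp only [hc, if_true]
    have heq : List.map (fun x => x.1)
        (List.map (fun p => if (p.1 == k) = true then (k, w) else p) d.items)
        = List.map (fun x => x.1) d.items := by
      rw [List.map_map]
      refine List.map_congr_left ?_
      intro p _
      by_cases hk : p.1 = k
      · simp [Function.comp, hk]
      · simp [Function.comp, hk]
    show (List.map (fun x => x.1)
        (List.map (fun p => if (p.1 == k) = true then (k, w) else p) d.items)).Nodup
    rw [heq]; exact h
  · simp only [hc]
    have hk : k ∉ d.keys := by
      intro hmem
      rw [PySem.Dict.contains_eq_decide_mem_keys] at hc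
      simp [hmem] at hc
    show (List.map (fun x => x.1) (d.items ++ [(k, w)])).Nodup
    rw [List.map_append]
    refine List.Nodup.append h (List.nodup_singleton k) ?_
    intro a ha hb
    simp only [List.map_cons, List.map_nil, List.mem_singleton] at hb
    exact hk (hb ▸ ha)

theorem keys_extend_nodup (items : List (String × List String)) :
    ∀ {d : PySem.Dict String (List String)}, d.keys.Nodup →
    (items.foldl pvExtendStep d).keys.Nodup := by
  induction items with
  | nil => intro _ h; exact h
  | cons kv t ih => intro d h; exact ih (keys_insert_nodup h kv.1 _)

theorem keys_phase1_nodup (L : List (List (String × List String))) :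
    ∀ {d : PySem.Dict String (List String)}, d.keys.Nodup →
    (L.foldl (fun d items => items.foldl pvExtendStep d) d).keys.Nodup := by
  induction L with
  | nil => intro _ h; exact h
  | cons items t ih => intro d h; exact ih (keys_extend_nodup items h)

-- phase 2: rewriting every key of a nodup-keyed dict in items order maps over the items
theorem phase2_items (l : List (String × List String)) :
    ∀ (rest : List (String × List String)) (d : PySem.Dict String (List String)),
    d.items = rest ++ l → ((rest ++ l).map Prod.fst).Nodup →
    (l.foldl (fun d kv => d.insert kv.1 (pvDedupA kv.2)) d).items
      = rest ++ l.map (fun kv => (kv.1, pvDedupA kv.2)) := by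
  induction l with
  | nil => intro rest d hd _; simpa using hd
  | cons kv t ih =>
    intro rest d hd hnd
    have hnd' : (rest.map Prod.fst ++ (kv.1 :: t.map Prod.fst)).Nodup := by
      simpa [List.map_append] using hnd
    obtain ⟨hnrest, hncons, hdisj⟩ := List.nodup_append.1 hnd'
    have hrest : ∀ p ∈ rest, p.1 ≠ kv.1 := by
      intro p hp he
      exact hdisj p.1 (List.mem_map.mpr ⟨p, hp, rfl⟩) kv.1 (by simp) he
    have hth : kv.1 ∉ t.map Prod.fst := (List.nodup_cons.1 hncons).1
    have ht : ∀ p ∈ t, p.1 ≠ kv.1 := by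
      intro p hp he
      exact hth (he ▸ List.mem_map.mpr ⟨p, hp, rfl⟩)
    have hc : d.contains kv.1 = true := by
      rw [PySem.Dict.contains_eq_decide_mem_keys]
      simp [PySem.Dict.keys, hd]
    have hrepl : (d.insert kv.1 (pvDedupA kv.2)).items
        = (rest ++ [(kv.1, pvDedupA kv.2)]) ++ t := by
      unfold PySem.Dict.insert
      simp only [hc, if_true, hd]
      rw [List.map_append, List.map_cons]
      have h1 : List.map (fun p => if (p.1 == kv.1) = true then (kv.1, pvDedupA kv.2) else p) rest
          = rest := by
        conv_rhs => rw [← List.map_id rest]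
        refine List.map_congr_left ?_
        intro p hp; simp [hrest p hp]
      have h2 : List.map (fun p => if (p.1 == kv.1) = true then (kv.1, pvDedupA kv.2) else p) t
          = t := by
        conv_rhs => rw [← List.map_id t]
        refine List.map_congr_left ?_
        intro p hp; simp [ht p hp]
      rw [h1, h2]
      simp
    have hnd2 : (((rest ++ [(kv.1, pvDedupA kv.2)]) ++ t).map Prod.fst).Nodup := by
      simpa [List.map_append] using hnd
    have := ih (rest ++ [(kv.1, pvDedupA kv.2)]) (d.insert kv.1 (pvDedupA kv.2)) hrepl hnd2
    simpa [List.foldl, List.append_assoc] using this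

-- ===== VERDICT (by name: the statement is the Claim_ definition above) =====
theorem merge_dicts_list_spec : Claim_equal_merge_dicts_list := by
  intro L _
  unfold Spec_merge_dicts_list merge_dicts_list merge_dicts_list_alt
  have hinv : pvInv (L.foldl (fun d items => items.foldl pvExtendStep d) PySem.Dict.empty)
      (L.foldl (fun res d => d.foldl pvMergeStep res) PySem.Dict.empty) :=
    pvInv_outer L (by rfl)
  set dA := L.foldl (fun d items => items.foldl pvExtendStep d) PySem.Dict.empty with hdA
  have hnd : (dA.items.map Prod.fst).Nodup := by
    have := keys_phase1_nodup L (d := PySem.Dict.empty) (by simp [PySem.Dict.empty, PySem.Dict.keys])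
    simpa [PySem.Dict.keys, hdA] using this
  have h2 := phase2_items dA.items [] dA rfl (by simpa using hnd)
  simp only [List.nil_append] at h2
  rw [h2, hinv]
  refine List.map_congr_left ?_
  intro kv _
  simp [pvF, pvDedupA_eq]
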